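-- pv_equiv track=rewrite | github.com/Gunther-Schulz/eml2pptx | lib/info.py | get_sender_positions
-- ===== SOURCE A (Python) =====
-- def group_consecutive_numbers(numbers):
--     ranges = []
--     for n in numbers:
--         if not ranges or n > ranges[-1][-1] + 1:
--             ranges.append([n])
--         else:
--             ranges[-1].append(n)
--     return ['{}-{}'.format(r[0], r[-1]) if len(r) > 1 else str(r[0]) for r in ranges]
--
-- def get_sender_positions(all_senders):
--     senders = [x for i, x in enumerate(
--         all_senders) if i == 0 or x != all_senders[i-1]]
--     duplicates = [item for item in senders if senders.count(item) > 1]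
--     senders = list(dict.fromkeys(duplicates))
--
--     sender_str_list = []
--     for sender in senders:
--         positions = [i+1 for i, x in enumerate(all_senders) if x == sender]
--         grouped_positions = group_consecutive_numbers(positions)
--         sender_str_list.append(
--             f'{sender} appears at pages {", ".join(grouped_positions)}')
--     return sender_str_list
-- ===== SOURCE B (Python) =====
-- def get_sender_positions(all_senders):
--     # One pass: record, per sender, its runs of consecutive pages as [first, last] pairs.
--     runs = {}
--     prev = None
--     for i, x in enumerate(all_senders):
--         rs = runs.setdefault(x, [])
--         if prev is not None and x == prev:
--             rs[-1][1] = i + 1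
--         else:
--             rs.append([i + 1, i + 1])
--         prev = x
--     out = []
--     for s, rs in runs.items():
--         if len(rs) > 1:
--             parts = [str(a) if a == b else '{}-{}'.format(a, b) for a, b in rs]
--             out.append(f'{s} appears at pages {", ".join(parts)}')
--     return out
-- ===== Notes on version B (the rewrite author's own statement) =====
-- stated objective: faster
-- what changed: A rescans the whole list once per duplicated sender (and calls list.count inside a comprehension, quadratic); B makes one pass that builds a dict mapping each sender to its list of consecutive-page runs and then formats the multi-run entries, O(n).
import Mathlib
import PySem

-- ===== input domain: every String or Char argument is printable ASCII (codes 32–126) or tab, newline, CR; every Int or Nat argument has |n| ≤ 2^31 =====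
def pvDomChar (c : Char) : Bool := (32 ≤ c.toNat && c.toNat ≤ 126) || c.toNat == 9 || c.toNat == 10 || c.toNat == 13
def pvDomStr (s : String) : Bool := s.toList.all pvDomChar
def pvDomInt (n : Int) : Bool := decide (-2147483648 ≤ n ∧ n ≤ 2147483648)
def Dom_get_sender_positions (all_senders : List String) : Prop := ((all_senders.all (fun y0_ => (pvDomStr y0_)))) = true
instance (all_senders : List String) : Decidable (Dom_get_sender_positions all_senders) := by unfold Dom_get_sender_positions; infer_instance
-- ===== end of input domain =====

-- B replaces A's per-duplicated-sender rescans of the whole list by one pass building a dict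
-- sender -> list of consecutive-page runs; same return value (objective: faster).

-- ===== PORT A =====
def group_consecutive_numbers (numbers : List Int) : List String :=
  let ranges : List (List Int) :=
    numbers.foldl (fun ranges n =>
      if ranges.isEmpty || decide (n > ranges.getLast!.getLast! + 1) then
        ranges ++ [[n]]
      else
        ranges.dropLast ++ [ranges.getLast! ++ [n]]) []
  ranges.map (fun r =>
    if r.length > 1 then PySem.Int.toStr r.head! ++ "-" ++ PySem.Int.toStr r.getLast!
    else PySem.Int.toStr r.head!)

def get_sender_positions (all_senders : List String) : List String :=
  let senders :=
    (PySem.List.enumerate all_senders).foldl (fun acc p =>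
      if p.1 == 0 || !(p.2 == PySem.List.pyGetD all_senders (p.1 - 1) "") then acc ++ [p.2] else acc) []
  let duplicates := senders.filter (fun item => senders.count item > 1)
  let senders2 := PySem.List.dedup duplicates
  senders2.foldl (fun acc sender =>
    let positions :=
      (PySem.List.enumerate all_senders).foldl (fun ps p =>
        if p.2 == sender then ps ++ [p.1 + 1] else ps) []
    let grouped := group_consecutive_numbers positions
    acc ++ [sender ++ " appears at pages " ++ PySem.Str.join ", " grouped]) []

-- ===== PORT B =====
def get_sender_positions_alt (all_senders : List String) : List String :=
  let st :=
    (PySem.List.enumerate all_senders).foldl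
      (fun (st : PySem.Dict String (List (Int × Int)) × Option String) p =>
        let d := st.1.setdefault p.2 []
        let rs := d.getD p.2 []
        let rs' := if st.2 == some p.2 then rs.dropLast ++ [(rs.getLast!.1, p.1 + 1)]
                   else rs ++ [(p.1 + 1, p.1 + 1)]
        (d.insert p.2 rs', some p.2))
      (PySem.Dict.empty, none)
  st.1.items.foldl (fun out sr =>
    if sr.2.length > 1 then
      out ++ [sr.1 ++ " appears at pages " ++
        PySem.Str.join ", " (sr.2.map (fun ab =>
          if ab.1 == ab.2 then PySem.Int.toStr ab.1
          else PySem.Int.toStr ab.1 ++ "-" ++ PySem.Int.toStr ab.2))]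
    else out) []

-- ===== PRECONDITION & SPEC =====
def Spec_get_sender_positions (all_senders : List String) (out : List String) : Prop := out = get_sender_positions_alt all_senders
instance (all_senders : List String) (out : List String) : Decidable (Spec_get_sender_positions all_senders out) := by unfold Spec_get_sender_positions; infer_instance

-- ===== CLAIM (what is proved, stated in full; the proofs are below) =====
def Claim_equal_get_sender_positions : Prop := ∀ (all_senders : List String), Dom_get_sender_positions all_senders → Spec_get_sender_positions all_senders (get_sender_positions all_senders)

-- ===== LEMMAS AND PROOFS =====

def posA (L : List String) (s : String) : List Int :=
  (PySem.List.enumerate L).foldl (fun ps p => if p.2 == s then ps ++ [p.1 + 1] else ps) []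

lemma enum_concat (L : List String) (x : String) : PySem.List.enumerate (L ++ [x]) = PySem.List.enumerate L ++ [((L.length:Int), x)] := by
  simp [PySem.List.enumerate_append, PySem.List.enumerate_cons, PySem.List.enumerate_nil]

lemma posA_append (L : List String) (x s : String) :
    posA (L ++ [x]) s = posA L s ++ (if x = s then [(L.length : Int) + 1] else []) := by
  rw [posA, enum_concat, List.foldl_append]
  by_cases h : x = s <;> simp [posA, h]

lemma posA_bounds (L : List String) (s : String) :
    ∀ n ∈ posA L s, 1 ≤ n ∧ n ≤ (L.length : Int) ∧ (n = (L.length : Int) → L.getLast? = some s) := by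
  induction L using List.reverseRecOn with
  | nil => simp [posA]
  | append_singleton L x ih =>
    intro n hn
    rw [posA_append] at hn
    rcases List.mem_append.mp hn with h | h
    · obtain ⟨h1, h2, _⟩ := ih n h
      refine ⟨h1, by simp; omega, fun he => ?_⟩
      simp at he; omega
    · by_cases hx : x = s
      · simp [hx] at h
        subst h
        refine ⟨by omega, by simp, fun _ => ?_⟩
        simp [hx]
      · simp [hx] at h

lemma posA_nil_of_not_mem (L : List String) (s : String) (h : s ∉ L) : posA L s = [] := by
  induction L using List.reverseRecOn with
  | nil => simp [posA]
  | append_singleton L x ih =>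
    simp at h
    rw [posA_append]
    simp [ih h.1]
    intro hxs; exact absurd hxs.symm h.2

lemma posA_last (L : List String) (s : String) (h : L.getLast? = some s) :
    (posA L s).getLast? = some (L.length : Int) := by
  rcases List.eq_nil_or_concat L with rfl | ⟨L', x, rfl⟩
  · simp at h
  · rw [List.concat_eq_append] at *
    rw [List.getLast?_append_cons] at h
    simp at h
    subst h
    rw [posA_append]
    simp

def stepGP (rs : List (Int × Int)) (n : Int) : List (Int × Int) :=
  if rs ≠ [] ∧ n = rs.getLast!.2 + 1 then rs.dropLast ++ [(rs.getLast!.1, n)] else rs ++ [(n, n)]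

def groupPairs (ns : List Int) : List (Int × Int) := ns.foldl stepGP []

lemma groupPairs_append (ns : List Int) (n : Int) :
    groupPairs (ns ++ [n]) = stepGP (groupPairs ns) n := by
  simp [groupPairs, List.foldl_append]

lemma stepGP_ne_nil (rs : List (Int × Int)) (n : Int) : stepGP rs n ≠ [] := by
  unfold stepGP; split <;> simp

lemma stepGP_last (rs : List (Int × Int)) (n : Int) : (stepGP rs n).getLast!.2 = n := by
  unfold stepGP; split <;> simp [List.getLast!_eq_getLast?_getD]

lemma groupPairs_nil_iff (ns : List Int) : groupPairs ns = [] ↔ ns = [] := by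
  rcases List.eq_nil_or_concat' ns with rfl | ⟨ns', n, rfl⟩
  · simp [groupPairs]
  · rw [groupPairs_append]
    simp [stepGP_ne_nil]

lemma groupPairs_last_snd (ns : List Int) (h : ns ≠ []) :
    (groupPairs ns).getLast!.2 = ns.getLast! := by
  rcases List.eq_nil_or_concat' ns with rfl | ⟨ns', n, rfl⟩
  · simp at h
  · rw [groupPairs_append, stepGP_last]
    simp [List.getLast!_eq_getLast?_getD]

lemma extendCond (L : List String) (s : String) :
    (groupPairs (posA L s) ≠ [] ∧ (groupPairs (posA L s)).getLast!.2 = (L.length : Int)) ↔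
      L.getLast? = some s := by
  constructor
  · rintro ⟨h1, h2⟩
    have hp : posA L s ≠ [] := by
      intro he; exact h1 (by rw [he]; simp [groupPairs])
    rw [groupPairs_last_snd _ hp] at h2
    have hmem : (posA L s).getLast! ∈ posA L s := by
      rw [List.getLast!_eq_getLast?_getD]
      cases hq : (posA L s).getLast? with
      | none => rw [List.getLast?_eq_none_iff] at hq; exact absurd hq hp
      | some v => exact List.mem_of_getLast? hq
    exact ((posA_bounds L s _ hmem).2.2) h2
  · intro h
    have hl := posA_last L s h
    have hp : posA L s ≠ [] := by
      intro he; rw [he] at hl; simp at hl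
    have h1 : groupPairs (posA L s) ≠ [] := by
      rw [Ne, groupPairs_nil_iff]; exact hp
    refine ⟨h1, ?_⟩
    rw [groupPairs_last_snd _ hp, List.getLast!_eq_getLast?_getD, hl]
    rfl

def sendersA (L : List String) : List String :=
  (PySem.List.enumerate L).foldl (fun acc p =>
    if p.1 == 0 || !(p.2 == PySem.List.pyGetD L (p.1 - 1) "") then acc ++ [p.2] else acc) []

lemma sendersA_append (L : List String) (x : String) :
    sendersA (L ++ [x]) = sendersA L ++ (if L.getLast? = some x then [] else [x]) := by
  rcases eq_or_ne L [] with rfl | hne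
  · simp [sendersA, PySem.List.enumerate_cons, PySem.List.enumerate_nil]
  · have hlen : L.length ≠ 0 := by simp [hne]
    rw [sendersA, enum_concat, List.foldl_append]
    have hcongr : (PySem.List.enumerate L).foldl (fun acc p =>
        if p.1 == 0 || !(p.2 == PySem.List.pyGetD (L ++ [x]) (p.1 - 1) "") then acc ++ [p.2] else acc) [] = sendersA L := by
      rw [sendersA]
      apply PySem.List.foldl_congr_mem
      intro acc p hp
      rcases (PySem.List.mem_enumerate_iff _ _ _).mp hp with ⟨k, hk, rfl⟩
      rcases Nat.eq_zero_or_pos k with rfl | hkpos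
      · simp
      · have h1 : ((0:Int) + k) - 1 = ((k-1 : Nat) : Int) := by push_cast [Nat.cast_sub hkpos]; ring
        rw [h1, PySem.List.pyGetD_natCast, PySem.List.pyGetD_natCast]
        have h2 : k - 1 < L.length := by omega
        rw [List.getD_eq_getElem?_getD, List.getD_eq_getElem?_getD, List.getElem?_append_left h2]
    rw [hcongr]
    have hidx : ((L.length:Int)) - 1 = ((L.length - 1 : Nat) : Int) := by
      push_cast [Nat.cast_sub (by omega : 1 ≤ L.length)]; ring
    simp only [List.foldl_cons, List.foldl_nil]
    rw [hidx, PySem.List.pyGetD_natCast]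
    have h2 : L.length - 1 < L.length := by omega
    have hget : (L ++ [x]).getD (L.length - 1) "" = L.getLast! := by
      rw [List.getD_eq_getElem?_getD, List.getElem?_append_left h2, List.getElem?_eq_getElem h2,
        List.getLast!_eq_getLast?_getD, List.getLast?_eq_getElem?]
      simp [List.getElem?_eq_getElem h2]
    have hlast? : L.getLast? = some L.getLast! := by
      rw [List.getLast!_eq_getLast?_getD]
      cases hq : L.getLast? with
      | none => rw [List.getLast?_eq_none_iff] at hq; exact absurd hq hne
      | some v => rfl
    have hc0 : (((L.length:Nat) : Int) == 0) = false := by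
      simp; omega
    rw [hget, hc0]
    by_cases hx : x = L.getLast!
    · subst hx
      rw [hlast?]
      simp
    · rw [hlast?]
      have hxx : (x == L.getLast!) = false := by rw [beq_eq_false_iff_ne]; exact hx
      rw [hxx]
      have hns : ¬ (some L.getLast! = some x) := by
        intro h; exact hx (Option.some.inj h).symm
      rw [if_neg hns]
      simp

lemma mem_sendersA (L : List String) (x : String) : x ∈ sendersA L ↔ x ∈ L := by
  induction L using List.reverseRecOn with
  | nil => simp [sendersA, PySem.List.enumerate_nil]
  | append_singleton L y ih =>
    rw [sendersA_append]
    by_cases h : L.getLast? = some y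
    · have hy : y ∈ L := List.mem_of_getLast? h
      simp [h, ih]
      intro hx; subst hx; exact hy
    · simp [h, ih]

lemma runcount (L : List String) (s : String) :
    (groupPairs (posA L s)).length = (sendersA L).count s := by
  induction L using List.reverseRecOn with
  | nil => simp [groupPairs, posA, sendersA, PySem.List.enumerate_nil]
  | append_singleton L x ih =>
    rw [posA_append, sendersA_append]
    by_cases hx : x = s
    · subst hx
      rw [if_pos rfl, groupPairs_append]
      by_cases hl : L.getLast? = some x
      · have hext := (extendCond L x).mpr hl
        rw [stepGP, if_pos (by exact ⟨hext.1, by rw [hext.2]⟩)]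
        rw [if_pos hl]
        simp [ih]
        have hpos : 0 < List.count x (sendersA L) := by
          rw [← ih]; exact List.length_pos_of_ne_nil hext.1
        omega
      · have hnot : ¬ (groupPairs (posA L x) ≠ [] ∧ ((L.length:Int) + 1 = (groupPairs (posA L x)).getLast!.2 + 1)) := by
          rintro ⟨h1, h2⟩
          exact hl ((extendCond L x).mp ⟨h1, by omega⟩)
        rw [stepGP, if_neg hnot, if_neg hl]
        simp [ih]
    · rw [if_neg hx]
      simp only [List.append_nil]
      rw [ih]
      by_cases hl : L.getLast? = some x
      · simp [hl]
      · simp [hl, List.count_append]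
        have : List.count s [x] = 0 := by
          simp [List.count_singleton]
          exact fun h => hx h
        omega

lemma dedup_append_singleton {α : Type} [BEq α] [LawfulBEq α] (xs : List α) (x : α) :
    PySem.List.dedup (xs ++ [x]) = PySem.List.dedup xs ++ (if x ∈ xs then [] else [x]) := by
  rw [PySem.List.dedup_eq_ofList, PySem.List.dedup_eq_ofList,
    PySem.Set.ofList_eq_foldl, PySem.Set.ofList_eq_foldl, List.foldl_append]
  simp only [List.foldl_cons, List.foldl_nil]
  rw [PySem.Set.add_eq_ite]
  have hmem : x ∈ List.foldl PySem.Set.add [] xs ↔ x ∈ xs := by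
    rw [← PySem.Set.ofList_eq_foldl, PySem.Set.mem_ofList]
  by_cases h : x ∈ xs
  · rw [if_pos (hmem.mpr h), if_pos h]; simp
  · rw [if_neg (fun hc => h (hmem.mp hc)), if_neg h]

lemma dedup_filter {α : Type} [BEq α] [LawfulBEq α] (p : α → Bool) (xs : List α) :
    PySem.List.dedup (xs.filter p) = (PySem.List.dedup xs).filter p := by
  induction xs using List.reverseRecOn with
  | nil => simp
  | append_singleton xs x ih =>
    rw [List.filter_append, dedup_append_singleton xs x, List.filter_append]
    by_cases hp : p x = true
    · have hfx : List.filter p [x] = [x] := by simp [hp]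
      rw [hfx, dedup_append_singleton, ih]
      by_cases hm : x ∈ xs
      · rw [if_pos (by rw [List.mem_filter]; exact ⟨hm, hp⟩), if_pos hm]
        simp
      · rw [if_neg (fun hc => hm (List.mem_filter.mp hc).1), if_neg hm, hfx]
    · have hfx : List.filter p [x] = [] := by simp [hp]
      rw [hfx, List.append_nil, ih]
      by_cases hm : x ∈ xs
      · rw [if_pos hm]; simp
      · rw [if_neg hm]; simp [hp]

lemma dedup_sendersA (L : List String) :
    PySem.List.dedup (sendersA L) = PySem.List.dedup L := by
  induction L using List.reverseRecOn with
  | nil => simp [sendersA, PySem.List.enumerate_nil]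
  | append_singleton L x ih =>
    rw [sendersA_append, dedup_append_singleton L x]
    by_cases hl : L.getLast? = some x
    · have hx : x ∈ L := List.mem_of_getLast? hl
      rw [if_pos hl, if_pos hx, List.append_nil, List.append_nil, ih]
    · rw [if_neg hl, dedup_append_singleton, ih]
      by_cases hm : x ∈ L
      · rw [if_pos hm, if_pos ((mem_sendersA L x).mpr hm)]
      · rw [if_neg hm, if_neg (fun hc => hm ((mem_sendersA L x).mp hc))]

def stepB (st : PySem.Dict String (List (Int × Int)) × Option String) (p : Int × String) :
    PySem.Dict String (List (Int × Int)) × Option String :=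
  let d := st.1.setdefault p.2 []
  let rs := d.getD p.2 []
  let rs' := if st.2 == some p.2 then rs.dropLast ++ [(rs.getLast!.1, p.1 + 1)]
             else rs ++ [(p.1 + 1, p.1 + 1)]
  (d.insert p.2 rs', some p.2)

def bfold (L : List String) : PySem.Dict String (List (Int × Int)) × Option String :=
  (PySem.List.enumerate L).foldl stepB (PySem.Dict.empty, none)

lemma bfold_append (L : List String) (x : String) :
    bfold (L ++ [x]) = stepB (bfold L) ((L.length : Int), x) := by
  rw [bfold, enum_concat, List.foldl_append]
  rfl

lemma bfold_inv (L : List String) :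
    (bfold L).1.items = (PySem.List.dedup L).map (fun s => (s, groupPairs (posA L s))) ∧
      (bfold L).2 = L.getLast? := by
  induction L using List.reverseRecOn with
  | nil =>
    constructor
    · simp [bfold, PySem.List.enumerate_nil]
      rfl
    · simp [bfold, PySem.List.enumerate_nil]
  | append_singleton L x ih =>
    obtain ⟨hitems, hprev⟩ := ih
    have hkeys : (bfold L).1.keys = PySem.List.dedup L := by
      rw [PySem.Dict.keys, hitems, List.map_map]
      simp [Function.comp_def]
    have hnd : (bfold L).1.keys.Nodup := by
      rw [hkeys, PySem.List.dedup_eq_ofList]; exact PySem.Set.nodup_ofList _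
    have hrs : (bfold L).1.getD x [] = groupPairs (posA L x) := by
      by_cases hm : x ∈ L
      · have hmem : (x, groupPairs (posA L x)) ∈ (bfold L).1.items := by
          rw [hitems]
          exact List.mem_map_of_mem (by rw [PySem.List.mem_dedup]; exact hm)
        exact PySem.Dict.getD_of_mem_items _ hmem hnd _
      · have hc : (bfold L).1.contains x = false := by
          apply eq_false_of_ne_true
          rw [PySem.Dict.contains_iff_mem_keys _ _, hkeys, PySem.List.mem_dedup]
          exact hm
        rw [PySem.Dict.getD_of_not_contains _ _ hc, posA_nil_of_not_mem L x hm]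
        rfl
    have hstep : groupPairs (posA (L ++ [x]) x) =
        if L.getLast? = some x then
          (groupPairs (posA L x)).dropLast ++ [((groupPairs (posA L x)).getLast!.1, (L.length:Int) + 1)]
        else groupPairs (posA L x) ++ [((L.length:Int) + 1, (L.length:Int) + 1)] := by
      rw [posA_append, if_pos rfl, groupPairs_append, stepGP]
      by_cases hl : L.getLast? = some x
      · have hext := (extendCond L x).mpr hl
        rw [if_pos ⟨hext.1, by rw [hext.2]⟩, if_pos hl]
      · have hnc : ¬ (groupPairs (posA L x) ≠ [] ∧ ((L.length:Int) + 1 = (groupPairs (posA L x)).getLast!.2 + 1)) := by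
          rintro ⟨hc1, hc2⟩
          exact hl ((extendCond L x).mp ⟨hc1, by omega⟩)
        rw [if_neg hnc, if_neg hl]
    rw [bfold_append]
    refine ⟨?_, by show some x = (L ++ [x]).getLast?; simp⟩
    show (((bfold L).1.setdefault x []).insert x
        (if (bfold L).2 == some x then
          (((bfold L).1.setdefault x []).getD x []).dropLast ++
            [((((bfold L).1.setdefault x []).getD x []).getLast!.1, (L.length:Int) + 1)]
        else ((bfold L).1.setdefault x []).getD x [] ++ [((L.length:Int) + 1, (L.length:Int) + 1)])).items = _
    rw [PySem.Dict.getD_setdefault_self, hrs, hprev]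
    have hbeq : ((L.getLast? == some x)) = decide (L.getLast? = some x) := by
      by_cases hl : L.getLast? = some x <;> simp [hl]
    rw [hbeq]
    have hrw : (if decide (L.getLast? = some x) = true then
          (groupPairs (posA L x)).dropLast ++ [((groupPairs (posA L x)).getLast!.1, (L.length:Int) + 1)]
        else groupPairs (posA L x) ++ [((L.length:Int) + 1, (L.length:Int) + 1)]) =
        groupPairs (posA (L ++ [x]) x) := by
      rw [hstep]
      by_cases hl : L.getLast? = some x <;> simp [hl]
    rw [hrw]
    by_cases hm : x ∈ L
    · have hct : (bfold L).1.contains x = true := by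
        rw [PySem.Dict.contains_iff_mem_keys _ _, hkeys, PySem.List.mem_dedup]; exact hm
      rw [PySem.Dict.setdefault_of_contains _ _ hct,
        PySem.Dict.items_insert_of_contains _ _ hct, hitems, List.map_map,
        dedup_append_singleton, if_pos hm, List.append_nil]
      apply List.map_congr_left
      intro s hs
      by_cases hsx : s = x
      · subst hsx
        simp only [Function.comp_def, beq_self_eq_true, if_true]
      · simp only [Function.comp_def]
        rw [if_neg (by simp [hsx]), posA_append, if_neg (fun h => hsx h.symm), List.append_nil]
    · have hcf : (bfold L).1.contains x = false := by
        apply eq_false_of_ne_true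
        rw [PySem.Dict.contains_iff_mem_keys _ _, hkeys, PySem.List.mem_dedup]
        exact hm
      rw [PySem.Dict.setdefault_of_not_contains _ _ hcf, PySem.Dict.insert_insert_self,
        PySem.Dict.items_insert_of_not_contains _ _ hcf, hitems,
        dedup_append_singleton, if_neg hm, List.map_append]
      congr 1
      apply List.map_congr_left
      intro s hs
      have hsx : s ≠ x := by
        rw [PySem.List.mem_dedup] at hs
        exact fun h => hm (h ▸ hs)
      rw [posA_append, if_neg (fun h => hsx h.symm), List.append_nil]

lemma posA_pairwise (L : List String) (s : String) : (posA L s).Pairwise (· < ·) := by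
  induction L using List.reverseRecOn with
  | nil => simp [posA, PySem.List.enumerate_nil]
  | append_singleton L x ih =>
    rw [posA_append]
    rw [List.pairwise_append]
    refine ⟨ih, by split <;> simp, ?_⟩
    intro a ha b hb
    have := (posA_bounds L s a ha).2.1
    by_cases hx : x = s
    · rw [if_pos hx] at hb
      simp at hb
      omega
    · rw [if_neg hx] at hb
      simp at hb

def stepA (ranges : List (List Int)) (n : Int) : List (List Int) :=
  if ranges.isEmpty || decide (n > ranges.getLast!.getLast! + 1) then ranges ++ [[n]]
  else ranges.dropLast ++ [ranges.getLast! ++ [n]]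

def rangesA (ns : List Int) : List (List Int) := ns.foldl stepA []

lemma rangesA_append (ns : List Int) (n : Int) : rangesA (ns ++ [n]) = stepA (rangesA ns) n := by
  simp [rangesA, List.foldl_append]

lemma rangesA_inv (ns : List Int) (h : ns.Pairwise (· < ·)) :
    (rangesA ns).map (fun r => (r.head!, r.getLast!)) = groupPairs ns ∧
    (∀ r ∈ rangesA ns, r ≠ []) ∧
    (∀ r ∈ rangesA ns, ∀ m ∈ r, m ∈ ns) ∧
    (∀ r ∈ rangesA ns, (r.length = 1 ↔ r.head! = r.getLast!)) := by
  induction ns using List.reverseRecOn with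
  | nil => simp [rangesA, groupPairs]
  | append_singleton ns n ih =>
    have hpw : ns.Pairwise (· < ·) := (List.pairwise_append.mp h).1
    have hlt : ∀ m ∈ ns, m < n := by
      intro m hm
      exact (List.pairwise_append.mp h).2.2 m hm n (by simp)
    obtain ⟨P1, P2, P3, P4⟩ := ih hpw
    rw [rangesA_append, groupPairs_append, stepA, stepGP]
    rcases eq_or_ne ns [] with rfl | hns
    · have hr : rangesA [] = [] := rfl
      have hg : groupPairs [] = [] := rfl
      rw [hr, hg]
      simp
    · have hrne : rangesA ns ≠ [] := by
        intro he
        rw [he] at P1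
        simp only [List.map_nil] at P1
        exact hns ((groupPairs_nil_iff ns).mp P1.symm)
      have hgne : groupPairs ns ≠ [] := by rw [Ne, groupPairs_nil_iff]; exact hns
      have hlastmem : (rangesA ns).getLast! ∈ rangesA ns := by
        rw [List.getLast!_eq_getLast?_getD]
        cases hq : (rangesA ns).getLast? with
        | none => rw [List.getLast?_eq_none_iff] at hq; exact absurd hq hrne
        | some v => exact List.mem_of_getLast? hq
      have hlne : (rangesA ns).getLast! ≠ [] := P2 _ hlastmem
      have hglast : (groupPairs ns).getLast! = ((rangesA ns).getLast!.head!, (rangesA ns).getLast!.getLast!) := by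
        rw [← P1, List.getLast!_eq_getLast?_getD, List.getLast?_map, List.getLast!_eq_getLast?_getD]
        cases hq : (rangesA ns).getLast? with
        | none => rw [List.getLast?_eq_none_iff] at hq; exact absurd hq hrne
        | some v => rfl
      have hlastlast : (rangesA ns).getLast!.getLast! = ns.getLast! := by
        have := groupPairs_last_snd ns hns
        rw [hglast] at this
        exact this
      have hsnd : (groupPairs ns).getLast!.2 = ns.getLast! := groupPairs_last_snd ns hns
      have hfst : (groupPairs ns).getLast!.1 = (rangesA ns).getLast!.head! := by rw [hglast]
      have hlastlt : ns.getLast! < n := by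
        apply hlt
        rw [List.getLast!_eq_getLast?_getD]
        cases hq : ns.getLast? with
        | none => rw [List.getLast?_eq_none_iff] at hq; exact absurd hq hns
        | some v => exact List.mem_of_getLast? hq
      have hemp : (rangesA ns).isEmpty = false := List.isEmpty_eq_false_iff.mpr hrne
      rw [hemp, hlastlast]
      by_cases hgt : n > ns.getLast! + 1
      · rw [if_pos (by rw [Bool.false_or, decide_eq_true_eq]; exact hgt),
          if_neg (by rintro ⟨-, h2⟩; rw [hsnd] at h2; omega)]
        refine ⟨by rw [List.map_append, P1]; rfl, ?_, ?_, ?_⟩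
        · intro r hr
          rcases List.mem_append.mp hr with hr | hr
          · exact P2 r hr
          · rw [List.mem_singleton] at hr; subst hr; simp
        · intro r hr m hm
          rcases List.mem_append.mp hr with hr | hr
          · exact List.mem_append_left _ (P3 r hr m hm)
          · rw [List.mem_singleton] at hr; subst hr
            rw [List.mem_singleton] at hm; subst hm; simp
        · intro r hr
          rcases List.mem_append.mp hr with hr | hr
          · exact P4 r hr
          · rw [List.mem_singleton] at hr; subst hr; simp
      · have heq : n = ns.getLast! + 1 := by omega
        rw [if_neg (by rw [Bool.false_or, decide_eq_true_eq]; omega),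
          if_pos (⟨hgne, by rw [hsnd]; omega⟩ : groupPairs ns ≠ [] ∧ n = (groupPairs ns).getLast!.2 + 1)]
        have hhead : ((rangesA ns).getLast! ++ [n]).head! = (rangesA ns).getLast!.head! := by
          rcases List.exists_cons_of_ne_nil hlne with ⟨a, t, hat⟩
          rw [hat]; rfl
        have hlastn : ((rangesA ns).getLast! ++ [n]).getLast! = n := by
          rw [List.getLast!_eq_getLast?_getD]
          simp
        have hheadmem : (rangesA ns).getLast!.head! ∈ (rangesA ns).getLast! := by
          rcases List.exists_cons_of_ne_nil hlne with ⟨a, t, hat⟩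
          rw [hat]; simp
        refine ⟨?_, ?_, ?_, ?_⟩
        · rw [List.map_append, hfst, ← P1, List.map_dropLast]
          congr 1
          rw [List.map_singleton, hhead, hlastn]
        · intro r hr
          rcases List.mem_append.mp hr with hr | hr
          · exact P2 r (List.mem_of_mem_dropLast hr)
          · rw [List.mem_singleton] at hr; subst hr; simp
        · intro r hr m hm
          rcases List.mem_append.mp hr with hr | hr
          · exact List.mem_append_left _ (P3 r (List.mem_of_mem_dropLast hr) m hm)
          · rw [List.mem_singleton] at hr; subst hr
            rcases List.mem_append.mp hm with hm | hm
            · exact List.mem_append_left _ (P3 _ hlastmem m hm)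
            · rw [List.mem_singleton] at hm; subst hm; simp
        · intro r hr
          rcases List.mem_append.mp hr with hr | hr
          · exact P4 r (List.mem_of_mem_dropLast hr)
          · rw [List.mem_singleton] at hr; subst hr
            constructor
            · intro hlen
              exfalso
              rw [List.length_append, List.length_singleton] at hlen
              have h0 : (rangesA ns).getLast!.length = 0 := by omega
              exact hlne (List.eq_nil_of_length_eq_zero h0)
            · intro hha
              exfalso
              rw [hhead, hlastn] at hha
              have hh : (rangesA ns).getLast!.head! ∈ ns := P3 _ hlastmem _ hheadmem
              have := hlt _ hh
              omega

def partFmt (ab : Int × Int) : String :=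
  if ab.1 == ab.2 then PySem.Int.toStr ab.1 else PySem.Int.toStr ab.1 ++ "-" ++ PySem.Int.toStr ab.2

lemma groupA_parts (ns : List Int) (h : ns.Pairwise (· < ·)) :
    group_consecutive_numbers ns = (groupPairs ns).map partFmt := by
  obtain ⟨P1, P2, _, P4⟩ := rangesA_inv ns h
  have hport : group_consecutive_numbers ns = (rangesA ns).map (fun r =>
      if r.length > 1 then PySem.Int.toStr r.head! ++ "-" ++ PySem.Int.toStr r.getLast!
      else PySem.Int.toStr r.head!) := rfl
  rw [hport, ← P1, List.map_map]
  apply List.map_congr_left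
  intro r hr
  have hne := P2 r hr
  have hiff := P4 r hr
  have hlen1 : 1 ≤ r.length := by
    rcases List.exists_cons_of_ne_nil hne with ⟨a, t, hat⟩
    rw [hat]; simp
  simp only [Function.comp_def, partFmt]
  by_cases hb : r.head! = r.getLast!
  · have h1 : r.length = 1 := hiff.mpr hb
    rw [if_neg (by omega), if_pos (by rw [beq_iff_eq]; exact hb)]
  · have h1 : r.length ≠ 1 := fun hc => hb (hiff.mp hc)
    rw [if_pos (by omega), if_neg (by rw [beq_iff_eq]; exact hb)]

lemma main_eq (L : List String) : get_sender_positions L = get_sender_positions_alt L := by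
  have hA : get_sender_positions L =
      (PySem.List.dedup ((sendersA L).filter (fun item => (sendersA L).count item > 1))).foldl
        (fun acc sender => acc ++ [sender ++ " appears at pages " ++
          PySem.Str.join ", " (group_consecutive_numbers (posA L sender))]) [] := rfl
  have hB : get_sender_positions_alt L =
      (bfold L).1.items.foldl (fun out sr =>
        if sr.2.length > 1 then
          out ++ [sr.1 ++ " appears at pages " ++ PySem.Str.join ", " (sr.2.map partFmt)]
        else out) [] := rfl
  rw [hA, hB, PySem.List.foldl_append_singleton_eq_map, PySem.List.foldl_append_ite,
    (bfold_inv L).1, List.filter_map, List.map_map, dedup_filter, dedup_sendersA,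
    List.nil_append, List.nil_append]
  have hfilter : (PySem.List.dedup L).filter (fun item => (sendersA L).count item > 1) =
      (PySem.List.dedup L).filter
        ((fun sr : String × List (Int × Int) => decide (sr.2.length > 1)) ∘ (fun s => (s, groupPairs (posA L s)))) := by
    apply List.filter_congr
    intro s _
    simp only [Function.comp_def, decide_eq_decide]
    rw [runcount]
  rw [hfilter]
  apply List.map_congr_left
  intro s _
  simp only [Function.comp_def]
  rw [groupA_parts _ (posA_pairwise L s)]

-- ===== VERDICT (by name: the statement is the Claim_ definition above) =====
theorem get_sender_positions_spec : Claim_equal_get_sender_positions := by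
  intro L _
  show get_sender_positions L = get_sender_positions_alt L
  exact main_eq L
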